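-- pv_equiv track=rewrite | github.com/Galmmarod/riboswitch_t-box-system | SLS.py | frecuencia_codones
-- ===== SOURCE A (Python) =====
-- def frecuencia_codones(codones_encontrados, total_modelos):
--     frecuencias = {}
--     for codon in codones_encontrados:
--         if codon not in frecuencias:
--             frecuencias[codon] = 0
--         frecuencias[codon] += 1
--     for codon in frecuencias:
--         frecuencias[codon] = frecuencias[codon]
--     frecuencias_ordenadas = sorted(frecuencias.items())
--     return frecuencias_ordenadas
-- ===== SOURCE B (Python) =====
-- def frecuencia_codones(codones_encontrados, total_modelos):
--     # sort-then-group: scan the sorted codons once, extending the current run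
--     ordenados = sorted(codones_encontrados)
--     resultado = []
--     for codon in ordenados:
--         if resultado and resultado[-1][0] == codon:
--             resultado[-1] = (codon, resultado[-1][1] + 1)
--         else:
--             resultado.append((codon, 1))
--     return resultado
-- ===== Notes on version B (the rewrite author's own statement) =====
-- stated objective: alternative
-- what changed: Replaces the dict-count-then-sort-items algorithm by sorting the input list first and grouping consecutive equal codons in one scan, building the sorted frequency list directly.
import Mathlib
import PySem

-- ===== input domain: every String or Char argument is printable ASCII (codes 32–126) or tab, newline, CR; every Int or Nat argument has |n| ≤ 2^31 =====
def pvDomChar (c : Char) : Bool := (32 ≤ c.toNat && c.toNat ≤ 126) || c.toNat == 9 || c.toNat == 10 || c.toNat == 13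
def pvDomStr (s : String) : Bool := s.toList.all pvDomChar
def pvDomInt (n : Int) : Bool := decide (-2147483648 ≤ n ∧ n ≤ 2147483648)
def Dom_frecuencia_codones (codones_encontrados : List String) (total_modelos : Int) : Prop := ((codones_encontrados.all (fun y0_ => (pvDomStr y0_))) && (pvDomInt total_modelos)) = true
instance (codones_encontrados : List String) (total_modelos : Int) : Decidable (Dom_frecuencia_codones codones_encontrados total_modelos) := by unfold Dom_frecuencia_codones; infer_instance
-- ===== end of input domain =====

-- B sorts the input and groups consecutive equal codons in one scan instead of
-- counting into a dict and sorting the items (alternative decomposition, same cost class).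

-- ===== PORT A =====
def frecuencia_codones (codones_encontrados : List String) (total_modelos : Int) : List (String × Int) :=
  let frecuencias : PySem.Dict String Int :=
    codones_encontrados.foldl (fun frecuencias codon =>
      let frecuencias :=
        if frecuencias.contains codon then frecuencias else frecuencias.insert codon 0
      frecuencias.insert codon (frecuencias.getD codon 0 + 1)) PySem.Dict.empty
  -- 'for codon in frecuencias: frecuencias[codon] = frecuencias[codon]'
  let frecuencias := frecuencias.keys.foldl (fun d codon => d.insert codon (d.getD codon 0)) frecuencias
  -- sorted(frecuencias.items()): Python compares the (str, int) tuples lexicographically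
  PySem.List.sorted2 frecuencias.items Prod.fst Prod.snd

-- ===== PORT B =====
-- loop body of B: extend the current run (last slot) or start a new one
def pvGroupStep (resultado : List (String × Int)) (codon : String) : List (String × Int) :=
  match resultado.getLast? with
  | some p => if p.1 = codon then resultado.dropLast ++ [(codon, p.2 + 1)]
              else resultado ++ [(codon, 1)]
  | none => [(codon, 1)]

def frecuencia_codones_alt (codones_encontrados : List String) (total_modelos : Int) : List (String × Int) :=
  let ordenados := PySem.List.sorted codones_encontrados (fun s => s)
  ordenados.foldl pvGroupStep []

-- ===== PRECONDITION & SPEC =====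
def Spec_frecuencia_codones (codones_encontrados : List String) (total_modelos : Int) (out : List (String × Int)) : Prop := out = frecuencia_codones_alt codones_encontrados total_modelos
instance (codones_encontrados : List String) (total_modelos : Int) (out : List (String × Int)) : Decidable (Spec_frecuencia_codones codones_encontrados total_modelos out) := by unfold Spec_frecuencia_codones; infer_instance

-- ===== CLAIM (what is proved, stated in full; the proofs are below) =====
def Claim_equal_frecuencia_codones : Prop := ∀ (codones_encontrados : List String) (total_modelos : Int), Dom_frecuencia_codones codones_encontrados total_modelos → Spec_frecuencia_codones codones_encontrados total_modelos (frecuencia_codones codones_encontrados total_modelos)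

-- ===== LEMMAS AND PROOFS =====

-- right-to-left consecutive-run grouping, the specification both sides meet
def canonGroup : List String → List (String × Int)
  | [] => []
  | x :: t =>
    match canonGroup t with
    | [] => [(x, 1)]
    | (y, m) :: r => if x = y then (x, m + 1) :: r else (x, 1) :: (y, m) :: r

def mergeRun (c : String) (n : Int) : List (String × Int) → List (String × Int)
  | [] => [(c, n)]
  | (y, m) :: r => if y = c then (c, n + m) :: r else (c, n) :: (y, m) :: r

lemma canonGroup_cons (x : String) (t : List String) :
    canonGroup (x :: t) = mergeRun x 1 (canonGroup t) := by
  cases h : canonGroup t with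
  | nil => simp [canonGroup, mergeRun, h]
  | cons p r =>
    obtain ⟨y, m⟩ := p
    by_cases hxy : x = y
    · subst hxy; simp [canonGroup, mergeRun, h, add_comm]
    · simp [canonGroup, mergeRun, h, hxy, Ne.symm hxy]

lemma canonGroup_eq_nil {t : List String} (h : canonGroup t = []) : t = [] := by
  cases t with
  | nil => rfl
  | cons x t' =>
    exfalso
    cases hc : canonGroup t' with
    | nil => simp [canonGroup, hc] at h
    | cons p r =>
      obtain ⟨y, m⟩ := p
      by_cases hxy : x = y <;> simp [canonGroup, hc, hxy] at h

lemma pvGroupStep_last_self (R : List (String × Int)) (c : String) (n : Int) :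
    pvGroupStep (R ++ [(c, n)]) c = R ++ [(c, n + 1)] := by
  simp [pvGroupStep]

lemma pvGroupStep_last_ne (R : List (String × Int)) (c x : String) (n : Int) (h : c ≠ x) :
    pvGroupStep (R ++ [(c, n)]) x = (R ++ [(c, n)]) ++ [(x, 1)] := by
  simp [pvGroupStep, h]

-- the left-to-right fold of B computes canonGroup
lemma foldl_group (s : List String) : ∀ (R : List (String × Int)) (c : String) (n : Int),
    s.foldl pvGroupStep (R ++ [(c, n)]) = R ++ mergeRun c n (canonGroup s) := by
  induction s with
  | nil => intro R c n; simp [canonGroup, mergeRun]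
  | cons x t ih =>
    intro R c n
    rw [List.foldl_cons]
    by_cases hcx : c = x
    · subst hcx
      rw [pvGroupStep_last_self, ih R c (n + 1), canonGroup_cons]
      cases h : canonGroup t with
      | nil => simp [mergeRun]
      | cons p r =>
        obtain ⟨y, m⟩ := p
        by_cases hy : y = c
        · subst hy; simp [mergeRun]; ring_nf
        · simp [mergeRun, hy]
    · rw [pvGroupStep_last_ne R c x n hcx, ih (R ++ [(c, n)]) x 1, canonGroup_cons]
      cases h : canonGroup t with
      | nil => simp [mergeRun, Ne.symm hcx]
      | cons p r =>
        obtain ⟨y, m⟩ := p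
        by_cases hy : y = x
        · subst hy; simp [mergeRun, Ne.symm hcx]
        · simp [mergeRun, hy, Ne.symm hcx]

lemma foldl_group_nil (s : List String) : s.foldl pvGroupStep [] = canonGroup s := by
  cases s with
  | nil => rfl
  | cons x t =>
    rw [List.foldl_cons]
    have : pvGroupStep [] x = [] ++ [(x, 1)] := by simp [pvGroupStep]
    rw [this, foldl_group t [] x 1, canonGroup_cons]
    simp

-- keys of canonGroup come from the list
lemma canonGroup_keys_mem (s : List String) : ∀ p ∈ canonGroup s, p.1 ∈ s := by
  induction s with
  | nil => simp [canonGroup]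
  | cons x t ih =>
    intro p hp
    rw [canonGroup_cons x t] at hp
    cases h : canonGroup t with
    | nil =>
      rw [h] at hp
      simp [mergeRun] at hp
      simp [hp]
    | cons q r =>
      obtain ⟨y, m⟩ := q
      rw [h] at hp
      have hyr : ∀ q ∈ (y, m) :: r, (q : String × Int).1 ∈ t := fun q hq => ih q (h ▸ hq)
      by_cases hxy : y = x
      · rw [mergeRun, if_pos hxy] at hp
        rcases List.mem_cons.mp hp with hc | hc
        · subst hc; exact List.mem_cons_self
        · exact List.mem_cons_of_mem _ (hyr p (List.mem_cons_of_mem _ hc))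
      · rw [mergeRun, if_neg hxy] at hp
        rcases List.mem_cons.mp hp with hc | hc
        · subst hc; exact List.mem_cons_self
        · exact List.mem_cons_of_mem _ (hyr p hc)

-- keys of canonGroup of a sorted list are strictly increasing
lemma canonGroup_pairwise (s : List String) (hs : s.Pairwise (· ≤ ·)) :
    (canonGroup s).Pairwise (fun a b => a.1 < b.1) := by
  induction s with
  | nil => simp [canonGroup]
  | cons x t ih =>
    have ht : t.Pairwise (· ≤ ·) := hs.tail
    have hle : ∀ z ∈ t, x ≤ z := fun z hz => List.rel_of_pairwise_cons hs hz
    have iht := ih ht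
    rw [canonGroup_cons x t]
    cases h : canonGroup t with
    | nil => simp [mergeRun]
    | cons q r =>
      obtain ⟨y, m⟩ := q
      rw [h] at iht
      have hy : y ∈ t := canonGroup_keys_mem t (y, m) (h ▸ List.mem_cons_self)
      have hrk : ∀ b ∈ r, y < (b : String × Int).1 := fun b hb => List.rel_of_pairwise_cons iht hb
      by_cases hxy : y = x
      · rw [mergeRun, if_pos hxy]
        refine List.Pairwise.cons ?_ iht.tail
        intro b hb
        exact hxy ▸ hrk b hb
      · rw [mergeRun, if_neg hxy]
        have hxlty : x < y := lt_of_le_of_ne (hle y hy) (Ne.symm hxy)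
        refine List.Pairwise.cons ?_ iht
        intro b hb
        rcases List.mem_cons.mp hb with hc | hc
        · rw [hc]; exact hxlty
        · exact lt_trans hxlty (hrk b hc)

-- membership characterisation of canonGroup on sorted lists
lemma canonGroup_mem (s : List String) (hs : s.Pairwise (· ≤ ·)) :
    ∀ p : String × Int, p ∈ canonGroup s ↔ p.1 ∈ s ∧ p.2 = (s.count p.1 : Int) := by
  induction s with
  | nil => simp [canonGroup]
  | cons x t ih =>
    have ht : t.Pairwise (· ≤ ·) := hs.tail
    have hle : ∀ z ∈ t, x ≤ z := fun z hz => List.rel_of_pairwise_cons hs hz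
    have iht := ih ht
    intro p
    rw [canonGroup_cons x t]
    cases h : canonGroup t with
    | nil =>
      have ht0 : t = [] := canonGroup_eq_nil h
      subst ht0
      constructor
      · intro hp
        simp [mergeRun] at hp
        simp [hp, List.count_cons]
      · rintro ⟨h1, h2⟩
        simp at h1
        subst h1
        simp [List.count_cons] at h2
        simp [mergeRun, h2, Prod.ext_iff]
    | cons q r =>
      obtain ⟨y, m⟩ := q
      rw [h] at iht
      have hy : y ∈ t := canonGroup_keys_mem t (y, m) (h ▸ List.mem_cons_self)
      have hym : m = (t.count y : Int) := ((iht (y, m)).mp List.mem_cons_self).2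
      have hpw : ((y, m) :: r).Pairwise (fun a b => (a.1 : String) < b.1) :=
        h ▸ canonGroup_pairwise t ht
      have hrk : ∀ b ∈ r, y < (b : String × Int).1 :=
        fun b hb => List.rel_of_pairwise_cons hpw hb
      by_cases hxy : y = x
      · subst hxy
        rw [mergeRun, if_pos rfl]
        constructor
        · intro hp
          rcases List.mem_cons.mp hp with hc | hc
          · subst hc
            refine ⟨List.mem_cons_self, ?_⟩
            simp [List.count_cons, hym]
            push_cast; ring
          · have hmem := (iht p).mp (List.mem_cons_of_mem _ hc)
            have hne : p.1 ≠ y := by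
              have := hrk p hc
              exact fun hcc => absurd (hcc ▸ this) (lt_irrefl y)
            refine ⟨List.mem_cons_of_mem _ hmem.1, ?_⟩
            rw [hmem.2]
            simp [List.count_cons, hne, Ne.symm hne]
        · rintro ⟨h1, h2⟩
          by_cases hpx : p.1 = y
          · have hp2 : p.2 = 1 + m := by
              rw [h2, hpx, hym]
              simp [List.count_cons]
              push_cast; ring
            exact List.mem_cons.mpr (Or.inl (Prod.ext hpx hp2))
          · refine List.mem_cons.mpr (Or.inr ?_)
            have h1' : p.1 ∈ t := by
              rcases List.mem_cons.mp h1 with hc | hc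
              · exact absurd hc hpx
              · exact hc
            have hcnt : p.2 = (t.count p.1 : Int) := by
              rw [h2]
              simp [List.count_cons, hpx, Ne.symm hpx]
            have hmem := (iht p).mpr ⟨h1', hcnt⟩
            rcases List.mem_cons.mp hmem with hc | hc
            · exact absurd (congrArg Prod.fst hc) hpx
            · exact hc
      · have hxnt : x ∉ t := by
          intro hxt
          have hxcnt : (x, (t.count x : Int)) ∈ (y, m) :: r :=
            (iht (x, (t.count x : Int))).mpr ⟨hxt, rfl⟩
          rcases List.mem_cons.mp hxcnt with hc | hc
          · exact hxy (congrArg Prod.fst hc).symm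
          · have : y < x := hrk _ hc
            exact absurd (hle y hy) (not_le_of_gt this)
        rw [mergeRun, if_neg hxy]
        constructor
        · intro hp
          rcases List.mem_cons.mp hp with hc | hc
          · subst hc
            refine ⟨List.mem_cons_self, ?_⟩
            simp [List.count_cons, List.count_eq_zero_of_not_mem hxnt]
          · have hmem := (iht p).mp hc
            have hne : p.1 ≠ x := fun hcc => hxnt (hcc ▸ hmem.1)
            refine ⟨List.mem_cons_of_mem _ hmem.1, ?_⟩
            rw [hmem.2]
            simp [List.count_cons, hne, Ne.symm hne]
        · rintro ⟨h1, h2⟩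
          by_cases hpx : p.1 = x
          · have hp2 : p.2 = 1 := by
              rw [h2, hpx]
              simp [List.count_cons, List.count_eq_zero_of_not_mem hxnt]
            exact List.mem_cons.mpr (Or.inl (Prod.ext hpx hp2))
          · refine List.mem_cons.mpr (Or.inr ?_)
            have h1' : p.1 ∈ t := by
              rcases List.mem_cons.mp h1 with hc | hc
              · exact absurd hc hpx
              · exact hc
            exact (iht p).mpr ⟨h1', by rw [h2]; simp [List.count_cons, hpx, Ne.symm hpx]⟩

-- ===== A side =====

lemma dict_step_eq (d : PySem.Dict String Int) (c : String) :
    (let d' := if d.contains c then d else d.insert c 0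
     d'.insert c (d'.getD c 0 + 1)) = d.insert c (d.getD c 0 + 1) := by
  by_cases h : d.contains c
  · simp [h]
  · simp only [h, Bool.false_eq_true, if_false]
    rw [PySem.Dict.getD_insert_self, PySem.Dict.insert_insert_self,
      PySem.Dict.getD_of_not_contains d 0 (by simpa using h)]

lemma a_fold_eq_counter (xs : List String) :
    xs.foldl (fun frecuencias codon =>
      let frecuencias :=
        if frecuencias.contains codon then frecuencias else frecuencias.insert codon 0
      frecuencias.insert codon (frecuencias.getD codon 0 + 1)) PySem.Dict.empty
      = PySem.Dict.counter xs := by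
  have hfun : (fun (frecuencias : PySem.Dict String Int) codon =>
      let frecuencias :=
        if frecuencias.contains codon then frecuencias else frecuencias.insert codon 0
      frecuencias.insert codon (frecuencias.getD codon 0 + 1))
      = fun d x => d.insert x (d.getD x 0 + 1) := by
    funext d c; exact dict_step_eq d c
  rw [hfun, PySem.Dict.foldl_insert_getD_add_one_eq_counter]

lemma insert_getD_id (d : PySem.Dict String Int) (k : String)
    (hnd : d.keys.Nodup) (hc : d.contains k = true) :
    d.insert k (d.getD k 0) = d := by
  apply PySem.Dict.ext
  rw [PySem.Dict.items_insert_of_contains _ _ hc]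
  conv_rhs => rw [← List.map_id d.items]
  apply List.map_congr_left
  intro p hp
  by_cases hpk : p.1 = k
  · have : d.getD k 0 = p.2 := by
      have : (k, p.2) ∈ d.items := by rw [← hpk]; exact hp
      exact PySem.Dict.getD_of_mem_items d this hnd 0
    simp [hpk, this, Prod.ext_iff]
  · simp [hpk]

lemma second_loop_id (d : PySem.Dict String Int) (hnd : d.keys.Nodup) :
    ∀ ks : List String, (∀ k ∈ ks, d.contains k = true) →
      ks.foldl (fun d codon => d.insert codon (d.getD codon 0)) d = d := by
  intro ks
  induction ks with
  | nil => intro _; rfl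
  | cons k t ih =>
    intro h
    rw [List.foldl_cons, insert_getD_id d k hnd (h k List.mem_cons_self)]
    exact ih (fun k' hk' => h k' (List.mem_cons_of_mem _ hk'))

-- insertBy / sorted2 congruence machinery
lemma insertBy_congr {α : Type} (b1 b2 : α → α → Bool) (x : α) (acc : List α)
    (h : ∀ y ∈ acc, b1 x y = b2 x y) :
    PySem.List.insertBy b1 x acc = PySem.List.insertBy b2 x acc := by
  induction acc with
  | nil => rfl
  | cons y ys ih =>
    have hy := h y List.mem_cons_self
    simp only [PySem.List.insertBy, hy]
    by_cases hb : b2 x y = true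
    · simp [hb]
    · simp only [hb, if_false]
      rw [ih (fun z hz => h z (List.mem_cons_of_mem _ hz))]

lemma foldl_insertBy_congr {α : Type} (b1 b2 : α → α → Bool) (S : List α)
    (hS : ∀ a ∈ S, ∀ c ∈ S, b1 a c = b2 a c) :
    ∀ (xs acc : List α), (∀ x ∈ xs, x ∈ S) → (∀ y ∈ acc, y ∈ S) →
      xs.foldl (fun acc x => PySem.List.insertBy b1 x acc) acc
        = xs.foldl (fun acc x => PySem.List.insertBy b2 x acc) acc := by
  intro xs
  induction xs with
  | nil => intro acc _ _; rfl
  | cons x t ih =>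
    intro acc hxs hacc
    have hxS : x ∈ S := hxs x List.mem_cons_self
    rw [List.foldl_cons, List.foldl_cons,
      insertBy_congr b1 b2 x acc (fun y hy => hS x hxS y (hacc y hy))]
    exact ih _ (fun z hz => hxs z (List.mem_cons_of_mem _ hz))
      (fun y hy => by
        rcases (PySem.List.mem_insertBy b2 x y acc).mp hy with h | h
        · exact h ▸ hxS
        · exact hacc y h)

lemma sorted2_eq_sorted_fst (L : List (String × Int))
    (hinj : ∀ a ∈ L, ∀ b ∈ L, a.1 = b.1 → a = b) :
    PySem.List.sorted2 L Prod.fst Prod.snd = PySem.List.sorted L Prod.fst := by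
  rw [PySem.List.sorted_eq_foldl_insertBy]
  show L.foldl (fun acc x => PySem.List.insertBy
      (fun a b => decide (a.1 < b.1) || (!decide (b.1 < a.1) && decide (a.2 < b.2))) x acc) []
    = L.foldl (fun acc x => PySem.List.insertBy (fun a b => decide (a.1 < b.1)) x acc) []
  apply foldl_insertBy_congr _ _ L ?_ L [] (fun _ h => h) (by simp)
  intro a ha c hc
  rcases lt_trichotomy a.1 c.1 with hlt | heq | hgt
  · simp [hlt]
  · have : a = c := hinj a ha c hc heq
    subst this
    simp
  · simp [hgt, not_lt_of_gt hgt, lt_asymm hgt]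

-- ===== assembling =====

lemma a_eq_canonGroup (xs : List String) (tm : Int) :
    frecuencia_codones xs tm = canonGroup (PySem.List.sorted xs (fun s => s)) := by
  unfold frecuencia_codones
  simp only [a_fold_eq_counter]
  rw [second_loop_id (PySem.Dict.counter xs) (PySem.Dict.nodup_keys_counter xs)
    (PySem.Dict.counter xs).keys
    (fun k hk => (PySem.Dict.contains_iff_mem_keys _ _).mpr hk)]
  set s := PySem.List.sorted xs (fun s => s) with hsdef
  have hsp : s.Perm xs := PySem.List.sorted_perm xs _ _
  have hsorted : s.Pairwise (· ≤ ·) := by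
    simpa using PySem.List.sorted_pairwise xs (fun s => s)
  have hmemL : ∀ p : String × Int,
      p ∈ (PySem.Dict.counter xs).items ↔ p.1 ∈ xs ∧ p.2 = (xs.count p.1 : Int) := by
    intro p
    rw [PySem.Dict.items_counter]
    constructor
    · intro hp
      rcases List.mem_map.mp hp with ⟨k, hk, hkp⟩
      subst hkp
      exact ⟨(PySem.Set.mem_ofList xs k).mp hk, rfl⟩
    · rintro ⟨h1, h2⟩
      refine List.mem_map.mpr ⟨p.1, (PySem.Set.mem_ofList xs p.1).mpr h1, ?_⟩
      exact Prod.ext rfl h2.symm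
  have hmemC : ∀ p : String × Int,
      p ∈ canonGroup s ↔ p.1 ∈ xs ∧ p.2 = (xs.count p.1 : Int) := by
    intro p
    rw [canonGroup_mem s hsorted p, hsp.mem_iff, hsp.count_eq]
  have hpwC : (canonGroup s).Pairwise (fun a b => a.1 < b.1) :=
    canonGroup_pairwise s hsorted
  have hndC : (canonGroup s).Nodup := hpwC.imp (fun h => by
    intro hc; subst hc; exact absurd h (lt_irrefl _))
  have hndL : ((PySem.Dict.counter xs).items).Nodup := by
    rw [PySem.Dict.items_counter]
    exact (PySem.Set.nodup_ofList xs).map (fun a b hab => congrArg Prod.fst hab)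
  have hperm : (canonGroup s).Perm ((PySem.Dict.counter xs).items) := by
    rw [List.perm_ext_iff_of_nodup hndC hndL]
    intro p
    rw [hmemC p, hmemL p]
  have hinj : ∀ a ∈ (PySem.Dict.counter xs).items, ∀ b ∈ (PySem.Dict.counter xs).items,
      a.1 = b.1 → a = b := by
    intro a ha b hb hab
    have ha' := (hmemL a).mp ha
    have hb' := (hmemL b).mp hb
    exact Prod.ext hab (by rw [ha'.2, hb'.2, hab])
  rw [sorted2_eq_sorted_fst _ hinj]
  exact PySem.List.sorted_eq_of_perm_of_pairwise_lt _ _ Prod.fst hperm hpwC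

lemma b_eq_canonGroup (xs : List String) (tm : Int) :
    frecuencia_codones_alt xs tm = canonGroup (PySem.List.sorted xs (fun s => s)) := by
  unfold frecuencia_codones_alt
  exact foldl_group_nil _

-- ===== VERDICT (by name: the statement is the Claim_ definition above) =====
theorem frecuencia_codones_spec : Claim_equal_frecuencia_codones := by
  intro xs tm _
  unfold Spec_frecuencia_codones
  rw [a_eq_canonGroup xs tm, b_eq_canonGroup xs tm]
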